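-- pv_equiv track=rewrite | github.com/spaskalev/fretboard | fretboard.py | degrees_per_string
-- ===== SOURCE A (Python) =====
-- import itertools
--
-- notes = [
--     "A ",
--     "A#",
--     "B ",
--     "C ",
--     "C#",
--     "D ",
--     "D#",
--     "E ",
--     "F ",
--     "F#",
--     "G ",
--     "G#",
-- ]
--
-- degrees = [
--     "1 ",
--     "b2",
--     "2 ",
--     "b3",
--     "3 ",
--     "4 ",
--     "b5",
--     "5 ",
--     "b6",
--     "6 ",
--     "b7",
--     "7 ",
-- ]
--
-- def note_distance(note_tuple):
--     index1 = notes.index(note_tuple[0])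
--     index2 = notes.index(note_tuple[1])
--     diff = index2 - index1
--     if diff < 0:
--         diff = 12 + diff
--     return diff
--
-- def degrees_per_string(starting_note, note, count, mask):
--     index = note_distance((starting_note, note))
--     degree = ''
--     cdegrees = itertools.cycle(degrees)
--
--     for i in range(1, index+1):
--         degree = next(cdegrees)
--         pass
--
--     def masked():
--         degree = next(cdegrees)
--         if (1 << degrees.index(degree)) & mask:
--             return degree
--         return "  "
--
--     degree = next(cdegrees) # no mask for open strings
--     result = " {} ".format(degree)
--     for i in range(1, count):
--         degree = masked()
--         result += "| {} ".format(degree)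
--     result += "|"
--     return result
-- ===== SOURCE B (Python) =====
-- notes = [
--     "A ", "A#", "B ", "C ", "C#", "D ",
--     "D#", "E ", "F ", "F#", "G ", "G#",
-- ]
--
-- degrees = [
--     "1 ", "b2", "2 ", "b3", "3 ", "4 ",
--     "b5", "5 ", "b6", "6 ", "b7", "7 ",
-- ]
--
-- def degrees_per_string(starting_note, note, count, mask):
--     # Stage 1: render all 12 fret cells once (masked), as a lookup table.
--     cells = ["| {} ".format(d if (1 << p) & mask else "  ")
--              for p, d in enumerate(degrees)]
--     # Stage 2: rotate the table so the cell after the open string comes first.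
--     index = (notes.index(note) - notes.index(starting_note)) % 12
--     rotated = cells[index + 1:] + cells[:index + 1]
--     # Stage 3: tile whole 12-fret periods plus a remainder prefix.
--     q, r = divmod(max(count - 1, 0), 12)
--     return (" {} ".format(degrees[index])
--             + "".join(rotated) * q + "".join(rotated[:r]) + "|")
-- ===== Notes on version B (the rewrite author's own statement) =====
-- stated objective: alternative
-- what changed: Instead of stepping an itertools.cycle fret by fret with a stateful masked() closure, B pre-renders all 12 masked fret cells once as a table, rotates it to start after the open string, and tiles the output with divmod: whole 12-fret periods by string multiplication plus a sliced remainder prefix.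
import Mathlib
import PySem

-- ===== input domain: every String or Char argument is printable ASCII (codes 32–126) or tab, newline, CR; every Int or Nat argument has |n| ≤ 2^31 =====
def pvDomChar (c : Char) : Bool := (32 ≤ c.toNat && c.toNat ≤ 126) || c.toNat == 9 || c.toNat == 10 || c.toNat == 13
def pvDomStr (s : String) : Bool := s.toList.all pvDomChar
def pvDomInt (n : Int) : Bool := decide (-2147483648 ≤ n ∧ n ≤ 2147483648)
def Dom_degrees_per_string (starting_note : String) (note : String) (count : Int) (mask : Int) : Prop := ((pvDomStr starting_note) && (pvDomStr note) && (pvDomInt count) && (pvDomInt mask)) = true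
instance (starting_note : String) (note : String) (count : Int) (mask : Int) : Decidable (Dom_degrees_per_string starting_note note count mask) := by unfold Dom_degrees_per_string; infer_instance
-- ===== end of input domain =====

-- B replaces A's fret-by-fret itertools.cycle walk with a pre-rendered 12-cell
-- table that is rotated once and tiled with divmod (objective: alternative).

-- ===== PORT A =====
def pvNotes : List String :=
  ["A ", "A#", "B ", "C ", "C#", "D ", "D#", "E ", "F ", "F#", "G ", "G#"]

def pvDegrees : List String :=
  ["1 ", "b2", "2 ", "b3", "3 ", "4 ", "b5", "5 ", "b6", "6 ", "b7", "7 "]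

def note_distance? (note_tuple : String × String) : Option Int :=
  match PySem.List.index? pvNotes note_tuple.1, PySem.List.index? pvNotes note_tuple.2 with
  | some index1, some index2 =>
      let diff : Int := (index2 : Int) - (index1 : Int)
      some (if diff < 0 then 12 + diff else diff)
  | _, _ => none   -- notes.index raises ValueError (excluded by Pre_)

-- A's inner masked(): read the next cycle element (the cycle at position p is
-- degrees[p % 12]), then mask it by its own degrees.index
def pvMaskedA (mask : Int) (p : Int) : String :=
  let degree := PySem.List.pyGetD pvDegrees (PySem.Int.mod p 12) ""
  match PySem.List.index? pvDegrees degree with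
  | some j => if PySem.Int.band ((1 : Int) <<< j) mask ≠ 0 then degree else "  "
  | none => ""   -- unreachable: degree is always an element of pvDegrees

def degrees_per_string (starting_note : String) (note : String) (count : Int) (mask : Int) : String :=
  match note_distance? (starting_note, note) with
  | none => ""   -- Python raises ValueError here (excluded by Pre_)
  | some index =>
    -- itertools.cycle(degrees) modelled by its position counter p: next() = degrees[p % 12], p+1
    -- warm-up loop: for i in range(1, index+1): degree = next(cdegrees)
    let s0 : Int × String := (PySem.List.pyRange 1 (index + 1) 1).foldl
        (fun (s : Int × String) (_ : Int) =>
          (s.1 + 1, PySem.List.pyGetD pvDegrees (PySem.Int.mod s.1 12) "")) (0, "")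
    let degree := PySem.List.pyGetD pvDegrees (PySem.Int.mod s0.1 12) ""  -- no mask for open strings
    let result := " " ++ degree ++ " "
    let st := (PySem.List.pyRange 1 count 1).foldl
        (fun (s : Int × String) (_ : Int) =>
          (s.1 + 1, s.2 ++ ("| " ++ pvMaskedA mask s.1 ++ " ")))
        (s0.1 + 1, result)
    st.2 ++ "|"

-- ===== PORT B =====
-- exact port of Python's  s * q  for a string and an int (q ≤ 0 gives "")
def pyStrMul (s : String) (q : Int) : String := String.join (List.replicate q.toNat s)

def degrees_per_string_alt (starting_note : String) (note : String) (count : Int) (mask : Int) : String :=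
  -- Stage 1: render all 12 fret cells once (masked), as a lookup table.
  -- p from enumerate is ≥ 0, so .toNat is exact for Python's 1 << p
  let cells : List String := (PySem.List.enumerate pvDegrees 0).map
      (fun pd => "| " ++ (if PySem.Int.band ((1 : Int) <<< pd.1.toNat) mask ≠ 0 then pd.2 else "  ") ++ " ")
  match PySem.List.index? pvNotes note, PySem.List.index? pvNotes starting_note with
  | some i2, some i1 =>
    -- Stage 2: rotate the table so the cell after the open string comes first.
    let index := PySem.Int.mod ((i2 : Int) - (i1 : Int)) 12
    let rotated := PySem.List.slice cells (some (index + 1)) none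
                    ++ PySem.List.slice cells none (some (index + 1))
    -- Stage 3: tile whole 12-fret periods plus a remainder prefix.
    match PySem.Int.divmod? (max (count - 1) 0) 12 with
    | some (q, r) =>
        " " ++ PySem.List.pyGetD pvDegrees index "" ++ " "
          ++ pyStrMul (String.join rotated) q
          ++ String.join (PySem.List.slice rotated none (some r)) ++ "|"
    | none => ""   -- unreachable: divisor 12 ≠ 0
  | _, _ => ""   -- notes.index raises ValueError (excluded by Pre_)

-- ===== PRECONDITION & SPEC =====
-- Pre_ excludes exactly the inputs where notes.index raises ValueError (unknown note
-- names), on which both A and B raise.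
def Pre_degrees_per_string (starting_note : String) (note : String) (count : Int) (mask : Int) : Prop :=
  starting_note ∈ pvNotes ∧ note ∈ pvNotes
instance (starting_note : String) (note : String) (count : Int) (mask : Int) : Decidable (Pre_degrees_per_string starting_note note count mask) := by unfold Pre_degrees_per_string; infer_instance

def pvWitness_degrees_per_string : String × String × Int × Int := ("E ", "A ", 5, 181)

def Spec_degrees_per_string (starting_note : String) (note : String) (count : Int) (mask : Int) (out : String) : Prop := out = degrees_per_string_alt starting_note note count mask
instance (starting_note : String) (note : String) (count : Int) (mask : Int) (out : String) : Decidable (Spec_degrees_per_string starting_note note count mask out) := by unfold Spec_degrees_per_string; infer_instance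

-- ===== CLAIM (what is proved, stated in full; the proofs are below) =====
def Claim_equal_degrees_per_string : Prop := ∀ (starting_note : String) (note : String) (count : Int) (mask : Int), Dom_degrees_per_string starting_note note count mask → Pre_degrees_per_string starting_note note count mask → Spec_degrees_per_string starting_note note count mask (degrees_per_string starting_note note count mask)

-- ===== LEMMAS AND PROOFS =====

-- the per-fret cell A produces for cycle position p
def pvFret (mask : Int) (p : Int) : String :=
  "| " ++ (if PySem.Int.band ((1 : Int) <<< (PySem.Int.mod p 12).toNat) mask ≠ 0
           then PySem.List.pyGetD pvDegrees (PySem.Int.mod p 12) "" else "  ") ++ " "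

-- B's rendered cell for table slot j
def pvCell (mask : Int) (j : Nat) : String :=
  "| " ++ (if PySem.Int.band ((1 : Int) <<< j) mask ≠ 0
           then PySem.List.pyGetD pvDegrees (j : Int) "" else "  ") ++ " "

-- join of the first n cells of the infinite fret row starting after slot t
def pvRow (mask : Int) (t : Nat) (n : Nat) : String :=
  String.join ((List.range n).map (fun k => pvCell mask ((t + 1 + k) % 12)))

-- pvDegrees has pairwise-distinct entries, so degrees.index inverts degrees[k]
lemma idx_getD : ∀ k : Nat, k < 12 →
    PySem.List.index? pvDegrees (PySem.List.pyGetD pvDegrees (k : Int) "") = some k := by decide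

lemma maskedA_eq_fret (mask p : Int) : "| " ++ pvMaskedA mask p ++ " " = pvFret mask p := by
  have h0 : 0 ≤ PySem.Int.mod p 12 := PySem.Int.mod_nonneg p (by norm_num)
  have h12 : PySem.Int.mod p 12 < 12 := PySem.Int.mod_lt p (by norm_num)
  have hk : PySem.Int.mod p 12 = ((PySem.Int.mod p 12).toNat : Int) := by omega
  unfold pvMaskedA pvFret
  rw [hk]
  simp only [idx_getD (PySem.Int.mod p 12).toNat (by omega), Int.toNat_natCast]
  rfl

lemma fret_eq_cell (mask p : Int) (h : 0 ≤ p) :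
    pvFret mask p = pvCell mask (p.toNat % 12) := by
  have hm : PySem.Int.mod p 12 = ((p.toNat % 12 : Nat) : Int) := by
    rw [PySem.Int.mod_eq_emod_of_pos (by norm_num)]
    omega
  unfold pvFret pvCell
  rw [hm, Int.toNat_natCast]

-- warm-up loop: the cycle position advances by the length of the range
lemma warmup_fst (l : List Int) : ∀ (p : Int) (r : String),
    ((l.foldl (fun (s : Int × String) (_ : Int) =>
        (s.1 + 1, PySem.List.pyGetD pvDegrees (PySem.Int.mod s.1 12) "")) (p, r)).1)
      = p + l.length := by
  induction l with
  | nil => intro p r; simp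
  | cons x xs ih =>
      intro p r
      rw [List.foldl_cons, ih]
      simp only [List.length_cons]
      push_cast
      ring

-- A's main loop: the state-carrying fold appends one pvFret per step
lemma loops_eq (mask c : Int) : ∀ (n : Nat) (a b : Int), (b - a).toNat = n →
    ∀ (p : Int) (r : String), p = c + a →
    ((PySem.List.pyRange a b 1).foldl
        (fun (s : Int × String) (_ : Int) => (s.1 + 1, s.2 ++ ("| " ++ pvMaskedA mask s.1 ++ " ")))
        (p, r)).2
      = (PySem.List.pyRange a b 1).foldl (fun (r : String) (i : Int) => r ++ pvFret mask (c + i)) r := by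
  intro n
  induction n with
  | zero =>
      intro a b hn p r hp
      rw [PySem.List.pyRange_one_eq_nil (by omega)]
      simp
  | succ m ih =>
      intro a b hn p r hp
      rw [PySem.List.pyRange_one_cons (by omega)]
      simp only [List.foldl_cons]
      rw [ih (a + 1) b (by omega) (p + 1) _ (by omega)]
      rw [hp, maskedA_eq_fret]

lemma foldl_append_seed (l : List String) : ∀ (a b : String),
    l.foldl (fun r s => r ++ s) (a ++ b) = a ++ l.foldl (fun r s => r ++ s) b := by
  induction l with
  | nil => intro a b; rfl
  | cons y ys ih => intro a b; simp only [List.foldl_cons, String.append_assoc]; exact ih a (b ++ y)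

lemma sjoin_cons (x : String) (l : List String) :
    String.join (x :: l) = x ++ String.join l := by
  have : ("" : String) ++ x = x ++ "" := by simp
  simp only [String.join, List.foldl_cons, this, foldl_append_seed]

lemma sjoin_append (xs ys : List String) :
    String.join (xs ++ ys) = String.join xs ++ String.join ys := by
  induction xs with
  | nil => simp [String.join]
  | cons x xs ih => simp [sjoin_cons, ih, String.append_assoc]

-- a left fold of string appends is the seed followed by the join of the cells
lemma fold_to_join (g : Int → String) (l : List Int) : ∀ (r : String),
    l.foldl (fun (r : String) (i : Int) => r ++ g i) r = r ++ String.join (l.map g) := by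
  induction l with
  | nil => intro r; simp [String.join]
  | cons x xs ih => intro r; simp [ih, sjoin_cons, String.append_assoc]

lemma pyRange_eq_map_range : ∀ (n : Nat) (a b : Int), (b - a).toNat = n →
    PySem.List.pyRange a b 1 = (List.range n).map (fun (k : Nat) => a + (k : Int)) := by
  intro n
  induction n with
  | zero => intro a b hn; rw [PySem.List.pyRange_one_eq_nil (by omega)]; simp
  | succ m ih =>
      intro a b hn
      rw [PySem.List.pyRange_one_cons (by omega), ih (a + 1) b (by omega),
        List.range_succ_eq_map]
      rw [List.map_cons, List.map_map]
      refine congrArg₂ List.cons (by simp) ?_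
      apply List.map_congr_left; intro k _
      simp only [Function.comp_apply]; push_cast; ring

-- B's cell table is pvCell over the 12 slots
lemma cells_eq (mask : Int) :
    (PySem.List.enumerate pvDegrees 0).map
      (fun pd => "| " ++ (if PySem.Int.band ((1 : Int) <<< pd.1.toNat) mask ≠ 0 then pd.2 else "  ") ++ " ")
      = (List.range 12).map (pvCell mask) := by
  rfl

-- rotating the table by t+1 lines the slots up behind slot t
lemma rotated_eq (mask : Int) (t : Nat) (ht : t < 12) :
    PySem.List.slice ((List.range 12).map (pvCell mask)) (some ((t : Int) + 1)) none
      ++ PySem.List.slice ((List.range 12).map (pvCell mask)) none (some ((t : Int) + 1))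
      = (List.range 12).map (fun k => pvCell mask ((t + 1 + k) % 12)) := by
  rw [PySem.List.slice_from _ (by omega), PySem.List.slice_to _ (by omega)]
  have h : ((t : Int) + 1).toNat = t + 1 := by omega
  rw [h]
  interval_cases t <;> rfl

-- tiling: a periodic row of n cells is whole periods plus a remainder prefix
lemma row_tiling (mask : Int) (t : Nat) : ∀ (n : Nat),
    pvRow mask t n
      = String.join (List.replicate (n / 12) (pvRow mask t 12)) ++ pvRow mask t (n % 12) := by
  intro n
  induction n using Nat.strong_induction_on with
  | _ n ih =>
    by_cases h : n < 12
    · rw [Nat.div_eq_of_lt h, Nat.mod_eq_of_lt h]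
      simp [String.join]
    · obtain ⟨m, rfl⟩ : ∃ m, n = 12 + m := ⟨n - 12, by omega⟩
      have hsplit : pvRow mask t (12 + m) = pvRow mask t 12 ++ pvRow mask t m := by
        unfold pvRow
        rw [List.range_add, List.map_append, sjoin_append, List.map_map]
        congr 1
        apply congrArg
        apply List.map_congr_left
        intro k _
        simp only [Function.comp_apply]
        congr 1
        omega
      rw [hsplit, ih m (by omega)]
      have hd : (12 + m) / 12 = m / 12 + 1 := by omega
      have hm : (12 + m) % 12 = m % 12 := by omega
      rw [hd, hm, List.replicate_succ, sjoin_cons, String.append_assoc]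

theorem degrees_per_string_spec : Claim_equal_degrees_per_string := by
  intro sn n count mask _ hpre
  obtain ⟨hs, hn⟩ := hpre
  obtain ⟨i1, h1⟩ := Option.isSome_iff_exists.mp ((PySem.List.index?_isSome_iff pvNotes sn).mpr hs)
  obtain ⟨i2, h2⟩ := Option.isSome_iff_exists.mp ((PySem.List.index?_isSome_iff pvNotes n).mpr hn)
  obtain ⟨hk1, -, -⟩ := PySem.List.getElem_of_index?_eq_some h1
  obtain ⟨hk2, -, -⟩ := PySem.List.getElem_of_index?_eq_some h2
  have hl : pvNotes.length = 12 := by decide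
  rw [hl] at hk1 hk2
  unfold Spec_degrees_per_string degrees_per_string degrees_per_string_alt note_distance?
  rw [h1, h2]
  simp only []
  set diff : Int := (i2 : Int) - (i1 : Int) with hdiff
  have hb : -12 < diff ∧ diff < 12 := by constructor <;> omega
  have hmod : (if diff < 0 then 12 + diff else diff) = PySem.Int.mod diff 12 := by
    rw [PySem.Int.mod_eq_emod_of_pos (by norm_num)]; split_ifs <;> omega
  set d : Int := PySem.Int.mod diff 12 with hd
  have hd0 : 0 ≤ d := PySem.Int.mod_nonneg diff (by norm_num)
  have hd12 : d < 12 := PySem.Int.mod_lt diff (by norm_num)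
  rw [hmod]
  -- A: the warm-up leaves the cycle position at d
  have hw : ((PySem.List.pyRange 1 (d + 1) 1).foldl
      (fun (s : Int × String) (_ : Int) =>
        (s.1 + 1, PySem.List.pyGetD pvDegrees (PySem.Int.mod s.1 12) "")) (0, "")).1 = d := by
    rw [warmup_fst, PySem.List.length_pyRange_one]
    omega
  rw [hw]
  have hdd : PySem.Int.mod d 12 = d := by
    rw [hd, PySem.Int.mod_eq_emod_of_pos (by norm_num), PySem.Int.mod_eq_emod_of_pos (by norm_num)]
    omega
  rw [hdd]
  rw [loops_eq mask d ((count - 1).toNat) 1 count rfl (d + 1) _ (by ring), fold_to_join]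
  set n' : Nat := (count - 1).toNat with hn'
  set t : Nat := d.toNat with ht
  have hdt : d = (t : Int) := by omega
  rw [pyRange_eq_map_range n' 1 count (by omega), List.map_map]
  have hmap : (List.range n').map ((fun i => pvFret mask (d + i)) ∘ fun (k : Nat) => 1 + (k : Int))
      = (List.range n').map (fun k => pvCell mask ((t + 1 + k) % 12)) := by
    apply List.map_congr_left; intro k _
    simp only [Function.comp_apply]
    rw [show d + (1 + (k : Int)) = ((t + 1 + k : Nat) : Int) by omega,
      fret_eq_cell _ _ (by positivity), Int.toNat_natCast]
  rw [hmap]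
  -- B: the table, the rotation, the divmod
  rw [cells_eq, hdt, rotated_eq mask t (by omega)]
  have hmax : max (count - 1) 0 = (n' : Int) := by omega
  have hdm : PySem.Int.divmod? ((n' : Int)) 12 = some ((↑(n' / 12) : Int), (↑(n' % 12) : Int)) := by
    simp [PySem.Int.divmod?]
    constructor
    · exact_mod_cast PySem.Int.floordiv_natCast n' 12
    · exact_mod_cast PySem.Int.mod_natCast n' 12
  rw [hmax]
  simp only [hdm]
  -- remainder slice: take n' % 12 of the rotated table
  rw [PySem.List.slice_to _ (by positivity), Int.toNat_natCast, ← List.map_take, List.take_range,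
    Nat.min_eq_left (by omega)]
  -- tile and assemble
  have hrow := row_tiling mask t n'
  unfold pvRow at hrow
  rw [hrow, ← hdt]
  simp only [pyStrMul, Int.toNat_natCast, String.append_assoc]
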